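-- pv_equiv track=rewrite | github.com/FedorViest/UI | zad_2/main.py | heuristic_two
-- ===== SOURCE A (Python) =====
-- def find_char(map, character):
--     for y in range(len(map)):
--         for x in range(len(map[y])):
--             if map[y][x] == character:
--                 return x, y
--
-- def heuristic_two(node, goal):
--     distance = 0
--     for n in node:
--         for char in n:
--             if char != "X":
--                 x_start, y_start = find_char(node, char)
--                 x_goal, y_goal = find_char(goal, char)
--                 distance += manhattan_distance(x_start, x_goal, y_start, y_goal)
--     return distance
--
-- def manhattan_distance(x1, x2, y1, y2):
--     return abs(x2 - x1) + abs((y2 - y1))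
-- ===== SOURCE B (Python) =====
-- def heuristic_two(node, goal):
--     # Group cells by character: first-occurrence position maps plus an occurrence
--     # counter, then one sum of count * distance per DISTINCT character (A re-scans
--     # both grids for every single cell).
--     node_pos = {}
--     for y, row in enumerate(node):
--         for x, ch in enumerate(row):
--             node_pos.setdefault(ch, (x, y))
--     goal_pos = {}
--     for y, row in enumerate(goal):
--         for x, ch in enumerate(row):
--             goal_pos.setdefault(ch, (x, y))
--     counts = {}
--     for row in node:
--         for ch in row:
--             if ch != "X":
--                 counts[ch] = counts.get(ch, 0) + 1
--     total = 0
--     for ch, cnt in counts.items():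
--         x1, y1 = node_pos[ch]
--         x2, y2 = goal_pos[ch]
--         total += cnt * (abs(x2 - x1) + abs(y2 - y1))
--     return total
-- ===== Notes on version B (the rewrite author's own statement) =====
-- stated objective: faster
-- what changed: B groups the grid cells by character: it builds first-occurrence position maps and an occurrence counter in single passes, then sums count * manhattan distance once per DISTINCT character, instead of A's per-cell re-scan of both grids.
import Mathlib
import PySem

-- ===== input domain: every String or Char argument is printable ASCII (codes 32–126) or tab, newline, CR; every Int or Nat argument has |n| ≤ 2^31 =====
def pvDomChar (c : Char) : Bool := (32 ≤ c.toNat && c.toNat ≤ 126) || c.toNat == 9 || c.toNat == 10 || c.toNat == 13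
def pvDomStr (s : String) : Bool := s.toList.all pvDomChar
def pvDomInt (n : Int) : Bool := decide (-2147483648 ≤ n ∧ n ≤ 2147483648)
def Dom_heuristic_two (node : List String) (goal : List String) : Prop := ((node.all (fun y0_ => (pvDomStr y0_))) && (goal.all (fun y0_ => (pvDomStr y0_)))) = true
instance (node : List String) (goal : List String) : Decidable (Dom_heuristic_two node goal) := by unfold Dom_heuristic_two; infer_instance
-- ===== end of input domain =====

-- B groups the cells by character (first-occurrence maps + a counter, then one
-- count*distance term per distinct character) instead of A's per-cell grid re-scans;
-- equivalence of RETURN values on Pre_ (where A raises no exception).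

-- ===== PORT A =====
-- find_char inner loop: scan one row, x is the running column index
def findRowA (row : List Char) (c : Char) (x : Int) : Option Int :=
  match row with
  | [] => none
  | h :: t => if h = c then some x else findRowA t c (x + 1)

-- find_char: scan rows, y is the running row index; returns (x, y) or none (Python: returns None)
def findCharA (rows : List (List Char)) (c : Char) (y : Int) : Option (Int × Int) :=
  match rows with
  | [] => none
  | r :: rs =>
    match findRowA r c 0 with
    | some x => some (x, y)
    | none => findCharA rs c (y + 1)

-- inner loop of heuristic_two over one row; Option Int state: none = Python raised (unpacking None)
def loopRowA (node goal : List (List Char)) (row : List Char) (acc : Option Int) : Option Int :=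
  match row with
  | [] => acc
  | c :: t =>
    loopRowA node goal t
      (if c = 'X' then acc
       else
         match acc, findCharA node c 0, findCharA goal c 0 with
         | some a, some (xs, ys), some (xg, yg) => some (a + (|xg - xs| + |yg - ys|))
         | _, _, _ => none)

def loopA (node goal : List (List Char)) (rows : List (List Char)) (acc : Option Int) : Option Int :=
  match rows with
  | [] => acc
  | r :: rs => loopA node goal rs (loopRowA node goal r acc)

-- on Pre_ the loop never errors; .getD 0 only covers the excluded (raising) inputs
def heuristic_two (node : List String) (goal : List String) : Int :=
  (loopA (node.map String.toList) (goal.map String.toList) (node.map String.toList) (some 0)).getD 0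

-- ===== PORT B =====
-- setdefault pass: first-occurrence dict of one row (insertion order; insert only if absent)
def posRowB (d : List (Char × (Int × Int))) (row : List Char) (x y : Int) : List (Char × (Int × Int)) :=
  match row with
  | [] => d
  | h :: t => posRowB (if (d.lookup h).isNone then d ++ [(h, (x, y))] else d) t (x + 1) y

def posB (d : List (Char × (Int × Int))) (rows : List (List Char)) (y : Int) : List (Char × (Int × Int)) :=
  match rows with
  | [] => d
  | r :: rs => posB (posRowB d r 0 y) rs (y + 1)

-- counts[ch] = counts.get(ch, 0) + 1 for an existing key: bump in place
def incrB (d : List (Char × Int)) (c : Char) : List (Char × Int) :=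
  match d with
  | [] => []
  | (k, v) :: t => if k = c then (k, v + 1) :: t else (k, v) :: incrB t c

-- counting pass over one row (non-"X" cells only)
def cntRowB (d : List (Char × Int)) (row : List Char) : List (Char × Int) :=
  match row with
  | [] => d
  | c :: t =>
    cntRowB
      (if c = 'X' then d
       else match d.lookup c with
            | some _ => incrB d c
            | none => d ++ [(c, 1)]) t

def cntB (d : List (Char × Int)) (rows : List (List Char)) : List (Char × Int) :=
  match rows with
  | [] => d
  | r :: rs => cntB (cntRowB d r) rs

-- final sum over the counter's items (a missing key is Python's KeyError, outside Pre_)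
def sumItemsB (pn pg : List (Char × (Int × Int))) (l : List (Char × Int)) (acc : Int) : Int :=
  match l with
  | [] => acc
  | (c, cnt) :: t =>
    sumItemsB pn pg t
      (match pn.lookup c, pg.lookup c with
       | some (x1, y1), some (x2, y2) => acc + cnt * (|x2 - x1| + |y2 - y1|)
       | _, _ => acc)

def heuristic_two_alt (node : List String) (goal : List String) : Int :=
  let nrows := node.map String.toList
  let grows := goal.map String.toList
  let pn := posB [] nrows 0
  let pg := posB [] grows 0
  sumItemsB pn pg (cntB [] nrows) 0

-- ===== PRECONDITION & SPEC =====
-- Pre_ excludes exactly the inputs where A raises (TypeError: find_char(goal, c) returns None for a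
-- non-'X' char of node absent from goal; B raises KeyError there too).
def Pre_heuristic_two (node : List String) (goal : List String) : Prop :=
  (node.all (fun r => r.toList.all (fun c => c == 'X' || goal.any (fun g => g.toList.contains c)))) = true
instance (node : List String) (goal : List String) : Decidable (Pre_heuristic_two node goal) := by
  unfold Pre_heuristic_two; infer_instance

def pvWitness_heuristic_two : List String × List String := (["AX"], ["XA"])

def Spec_heuristic_two (node : List String) (goal : List String) (out : Int) : Prop := out = heuristic_two_alt node goal
instance (node : List String) (goal : List String) (out : Int) : Decidable (Spec_heuristic_two node goal out) := by unfold Spec_heuristic_two; infer_instance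

-- ===== CLAIM (what is proved, stated in full; the proofs are below) =====
def Claim_equal_heuristic_two : Prop := ∀ (node : List String) (goal : List String), Dom_heuristic_two node goal → Pre_heuristic_two node goal → Spec_heuristic_two node goal (heuristic_two node goal)

-- ===== LEMMAS AND PROOFS =====

-- per-character distance (0 when either char is missing; that case never matters on Pre_)
def hD (node goal : List (List Char)) (c : Char) : Int :=
  match findCharA node c 0, findCharA goal c 0 with
  | some (x1, y1), some (x2, y2) => |x2 - x1| + |y2 - y1|
  | _, _ => 0

-- sum of count * g over a counter list
def S (g : Char → Int) (l : List (Char × Int)) : Int := (l.map (fun e => e.2 * g e.1)).sum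

-- sum of g over the non-'X' chars of a row / a grid
def rowSum (g : Char → Int) (row : List Char) : Int := ((row.filter (fun c => !(c == 'X'))).map g).sum
def gridSum (g : Char → Int) (rows : List (List Char)) : Int := (rows.map (rowSum g)).sum

-- per-character contribution as B's final loop computes it
def gOf (pn pg : List (Char × (Int × Int))) (c : Char) : Int :=
  match pn.lookup c, pg.lookup c with
  | some (x1, y1), some (x2, y2) => |x2 - x1| + |y2 - y1|
  | _, _ => 0

theorem lookup_append_single {d : List (Char × (Int × Int))} {c h : Char} {p : Int × Int} :
    (d ++ [(h, p)]).lookup c = ((d.lookup c).or (if c = h then some p else none)) := by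
  induction d with
  | nil =>
    simp only [List.nil_append, List.lookup]
    cases hbe : c == h
    · simp [beq_eq_false_iff_ne.mp hbe]
    · simp [beq_iff_eq.mp hbe]
  | cons a t ih =>
    simp only [List.cons_append, List.lookup]
    cases hbe : c == a.1 <;> simp [ih]

theorem posRowB_lookup (row : List Char) (d : List (Char × (Int × Int))) (x y : Int) (c : Char) :
    (posRowB d row x y).lookup c = ((d.lookup c).or ((findRowA row c x).map (fun xx => (xx, y)))) := by
  induction row generalizing d x with
  | nil => simp [posRowB, findRowA]
  | cons h t ih =>
    simp only [posRowB, findRowA, ih]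
    by_cases hc : h = c
    · subst hc
      cases hd : d.lookup h with
      | none => simp [hd, lookup_append_single]
      | some p => simp [hd]
    · have hc' : ¬ c = h := fun e => hc e.symm
      cases hd : d.lookup h with
      | none => simp [lookup_append_single, hc, hc']
      | some p => simp [hc]

theorem posB_lookup (rows : List (List Char)) (d : List (Char × (Int × Int))) (y : Int) (c : Char) :
    (posB d rows y).lookup c = ((d.lookup c).or (findCharA rows c y)) := by
  induction rows generalizing d y with
  | nil => simp [posB, findCharA]
  | cons r rs ih =>
    simp only [posB, findCharA, ih, posRowB_lookup]
    cases hd : d.lookup c with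
    | some p => simp
    | none =>
      cases hf : findRowA r c 0 with
      | some x => simp
      | none => simp

theorem gOf_eq (node goal : List (List Char)) :
    gOf (posB [] node 0) (posB [] goal 0) = hD node goal := by
  funext c
  simp [gOf, hD, posB_lookup]

theorem findRowA_isSome_of_mem {row : List Char} {c : Char} (h : c ∈ row) (x : Int) :
    (findRowA row c x).isSome := by
  induction row generalizing x with
  | nil => cases h
  | cons a t ih =>
    simp only [findRowA]
    by_cases ha : a = c
    · simp [ha]
    · have : c ∈ t := by cases h with | head => exact absurd rfl ha | tail _ h' => exact h'
      simp [ha, ih this]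

theorem findCharA_isSome_of_mem {rows : List (List Char)} {r : List Char} {c : Char}
    (hr : r ∈ rows) (hc : c ∈ r) (y : Int) : (findCharA rows c y).isSome := by
  induction rows generalizing y with
  | nil => cases hr
  | cons a rs ih =>
    simp only [findCharA]
    cases hf : findRowA a c 0 with
    | some x => simp
    | none =>
      cases hr with
      | head =>
        have := findRowA_isSome_of_mem hc (0 : Int)
        rw [hf] at this; cases this
      | tail _ hr' => exact ih hr' (y + 1)

-- B-side sum lemmas
theorem sumItemsB_eq (pn pg : List (Char × (Int × Int))) (l : List (Char × Int)) (acc : Int) :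
    sumItemsB pn pg l acc = acc + S (gOf pn pg) l := by
  induction l generalizing acc with
  | nil => simp [sumItemsB, S]
  | cons e t ih =>
    obtain ⟨c, cnt⟩ := e
    have hstep : (match pn.lookup c, pg.lookup c with
        | some (x1, y1), some (x2, y2) => acc + cnt * (|x2 - x1| + |y2 - y1|)
        | _, _ => acc) = acc + cnt * gOf pn pg c := by
      unfold gOf
      cases pn.lookup c with
      | none => simp
      | some p1 =>
        obtain ⟨x1, y1⟩ := p1
        cases pg.lookup c with
        | none => simp
        | some p2 => obtain ⟨x2, y2⟩ := p2; rfl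
    simp only [sumItemsB]
    rw [hstep, ih]
    simp only [S, List.map, List.sum_cons]
    ring

theorem S_incr {g : Char → Int} {d : List (Char × Int)} {c : Char} {v : Int}
    (h : d.lookup c = some v) : S g (incrB d c) = S g d + g c := by
  induction d with
  | nil => simp [List.lookup] at h
  | cons e t ih =>
    obtain ⟨k, w⟩ := e
    by_cases hk : k = c
    · subst hk
      simp [incrB, S]
      ring
    · have hbe : (c == k) = false := beq_eq_false_iff_ne.mpr (fun e => hk e.symm)
      simp only [List.lookup, hbe] at h
      simp only [incrB, if_neg hk, S, List.map, List.sum_cons]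
      have := ih h
      simp only [S] at this
      rw [this]; ring

theorem S_bump (g : Char → Int) (d : List (Char × Int)) (c : Char) :
    S g (match d.lookup c with
         | some _ => incrB d c
         | none => d ++ [(c, 1)]) = S g d + g c := by
  cases h : d.lookup c with
  | some v => exact S_incr h
  | none => simp [S]

theorem cntRowB_S (g : Char → Int) (row : List Char) (d : List (Char × Int)) :
    S g (cntRowB d row) = S g d + rowSum g row := by
  induction row generalizing d with
  | nil => simp [cntRowB, rowSum]
  | cons c t ih =>
    by_cases hc : c = 'X'
    · simp only [cntRowB, ih, rowSum, List.filter, hc]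
      simp
    · have hbe : (c == 'X') = false := beq_eq_false_iff_ne.mpr hc
      simp only [cntRowB, if_neg hc, ih, S_bump, rowSum, List.filter, hbe]
      simp only [Bool.not_false, List.map, List.sum_cons]
      have : rowSum g t = ((t.filter (fun c => !(c == 'X'))).map g).sum := rfl
      rw [← this]; ring

theorem cntB_S (g : Char → Int) (rows : List (List Char)) (d : List (Char × Int)) :
    S g (cntB d rows) = S g d + gridSum g rows := by
  induction rows generalizing d with
  | nil => simp [cntB, gridSum]
  | cons r rs ih =>
    simp only [cntB, ih, cntRowB_S, gridSum, List.map, List.sum_cons]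
    have : gridSum g rs = (rs.map (rowSum g)).sum := rfl
    rw [← this]; ring

-- A-side: the row loop computes acc + rowSum of per-character distances (never errors on Pre_)
theorem loopRowA_eq (node goal : List (List Char)) (row : List Char) (acc : Int)
    (hn : ∀ c ∈ row, c ≠ 'X' → (findCharA node c 0).isSome)
    (hg : ∀ c ∈ row, c ≠ 'X' → (findCharA goal c 0).isSome) :
    loopRowA node goal row (some acc) = some (acc + rowSum (hD node goal) row) := by
  induction row generalizing acc with
  | nil => simp [loopRowA, rowSum]
  | cons c t ih =>
    by_cases hx : c = 'X'
    · subst hx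
      have e1 : loopRowA node goal ('X' :: t) (some acc) = loopRowA node goal t (some acc) := by
        simp [loopRowA]
      have e2 : rowSum (hD node goal) ('X' :: t) = rowSum (hD node goal) t := by
        simp [rowSum]
      rw [e1, e2]
      exact ih acc (fun d hd => hn d (List.mem_cons_of_mem _ hd)) (fun d hd => hg d (List.mem_cons_of_mem _ hd))
    · have h1 := hn c List.mem_cons_self hx
      have h2 := hg c List.mem_cons_self hx
      obtain ⟨pn, hpn⟩ := Option.isSome_iff_exists.mp h1
      obtain ⟨pg, hpg⟩ := Option.isSome_iff_exists.mp h2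
      obtain ⟨x1, y1⟩ := pn
      obtain ⟨x2, y2⟩ := pg
      have hbe : (c == 'X') = false := beq_eq_false_iff_ne.mpr hx
      have hdc : hD node goal c = |x2 - x1| + |y2 - y1| := by simp [hD, hpn, hpg]
      have e2 : rowSum (hD node goal) (c :: t) = hD node goal c + rowSum (hD node goal) t := by
        simp [rowSum, List.filter, hbe]
      simp only [loopRowA, if_neg hx, hpn, hpg]
      rw [ih _ (fun d hd => hn d (List.mem_cons_of_mem _ hd)) (fun d hd => hg d (List.mem_cons_of_mem _ hd))]
      rw [e2, hdc]
      congr 1; ring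

theorem loopA_eq (node goal : List (List Char)) (rows : List (List Char)) (acc : Int)
    (hn : ∀ r ∈ rows, ∀ c ∈ r, c ≠ 'X' → (findCharA node c 0).isSome)
    (hg : ∀ r ∈ rows, ∀ c ∈ r, c ≠ 'X' → (findCharA goal c 0).isSome) :
    loopA node goal rows (some acc) = some (acc + gridSum (hD node goal) rows) := by
  induction rows generalizing acc with
  | nil => simp [loopA, gridSum]
  | cons r rs ih =>
    simp only [loopA]
    rw [loopRowA_eq node goal r acc (hn r List.mem_cons_self) (hg r List.mem_cons_self)]
    rw [ih _ (fun s hs => hn s (List.mem_cons_of_mem _ hs)) (fun s hs => hg s (List.mem_cons_of_mem _ hs))]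
    simp only [gridSum, List.map, List.sum_cons]
    have : gridSum (hD node goal) rs = (rs.map (rowSum (hD node goal))).sum := rfl
    rw [← this]
    congr 1; ring

-- ===== VERDICT (by name: the statement is the Claim_ definition above) =====
theorem heuristic_two_spec : Claim_equal_heuristic_two := by
  intro node goal _ hpre
  unfold Spec_heuristic_two heuristic_two heuristic_two_alt
  have hn : ∀ r ∈ node.map String.toList, ∀ c ∈ r, c ≠ 'X' →
      (findCharA (node.map String.toList) c 0).isSome := by
    intro r hr c hc _
    exact findCharA_isSome_of_mem hr hc 0
  have hg : ∀ r ∈ node.map String.toList, ∀ c ∈ r, c ≠ 'X' →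
      (findCharA (goal.map String.toList) c 0).isSome := by
    intro r hr c hc hx
    obtain ⟨s, hs, rfl⟩ := List.mem_map.mp hr
    unfold Pre_heuristic_two at hpre
    simp only [List.all_eq_true, Bool.or_eq_true, beq_iff_eq, List.any_eq_true,
      List.contains_eq_mem, decide_eq_true_eq] at hpre
    obtain ⟨g, hgmem, hcg⟩ := (hpre s hs c hc).resolve_left hx
    exact findCharA_isSome_of_mem (List.mem_map.mpr ⟨g, hgmem, rfl⟩) hcg 0
  rw [loopA_eq _ _ _ 0 hn hg]
  rw [sumItemsB_eq, gOf_eq, cntB_S]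
  simp [S]
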